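-- pv_equiv track=rewrite | github.com/aczutro/czutils | src/czutils/lib/cziterable.py | findLastNotOf
-- ===== SOURCE A (Python) =====
-- def findLastNotOf(iterable, blackList) -> int:
--     """
--     Searches for the last occurrence in 'iterable' of any item that is not
--     blacklisted.
--
--     :param iterable:  A string, list, tuple or any iterable.
--     :param blackList: A non-empty set of blacklisted items.
--
--     :returns: Index of the last occurrence if found; -1 if not found.
--     """
--     if not blackList:
--         raise ValueError("'blackList' must not be empty")
--     #if
--
--     index = len(iterable)
--     for item in reversed(iterable):
--         index -= 1
--         if item not in blackList:
--             return index
--         #if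
--     #for
--
--     return -1
-- ===== SOURCE B (Python) =====
-- def findLastNotOf(iterable, blackList) -> int:
--     if not blackList:
--         raise ValueError("'blackList' must not be empty")
--     result = -1
--     for i in range(len(iterable)):
--         if iterable[i] not in blackList:
--             result = i
--     return result
-- ===== Notes on version B (the rewrite author's own statement) =====
-- stated objective: alternative
-- what changed: Replaces the reversed-iteration with early return by a forward index scan that maintains the last non-blacklisted index in an accumulator and returns it after the loop.
import Mathlib
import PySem

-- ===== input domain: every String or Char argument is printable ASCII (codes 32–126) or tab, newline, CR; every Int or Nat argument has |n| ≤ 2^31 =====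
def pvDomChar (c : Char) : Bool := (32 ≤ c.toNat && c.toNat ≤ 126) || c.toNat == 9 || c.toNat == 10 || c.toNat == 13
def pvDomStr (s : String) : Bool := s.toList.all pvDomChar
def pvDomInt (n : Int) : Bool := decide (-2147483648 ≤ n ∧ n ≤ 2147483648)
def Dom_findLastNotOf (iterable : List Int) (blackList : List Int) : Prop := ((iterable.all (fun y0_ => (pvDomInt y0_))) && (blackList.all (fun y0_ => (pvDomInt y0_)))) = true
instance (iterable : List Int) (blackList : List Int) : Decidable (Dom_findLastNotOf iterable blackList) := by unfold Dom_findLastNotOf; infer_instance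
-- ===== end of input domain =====

-- B replaces A's reversed scan with early return by a forward index scan keeping the last valid index; alternative decomposition, same cost.


-- ===== PORT A =====
-- the 'for item in reversed(iterable): index -= 1; if item not in blackList: return index' loop
def findLastNotOfGo (items : List Int) (index : Int) (blackList : List Int) : Int :=
  match items with
  | [] => -1
  | item :: rest =>
      let index' := index - 1
      if ¬ blackList.contains item then index' else findLastNotOfGo rest index' blackList

def findLastNotOf (iterable : List Int) (blackList : List Int) : Int :=
  findLastNotOfGo iterable.reverse (iterable.length : Int) blackList

-- ===== PORT B =====
def findLastNotOf_alt (iterable : List Int) (blackList : List Int) : Int :=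
  (List.range iterable.length).foldl
    (fun result i => if ¬ blackList.contains (iterable.getD i 0) then (i : Int) else result)
    (-1)

-- ===== PRECONDITION & SPEC =====
-- Pre_ excludes exactly the empty blackList, on which Python A (and B) raise ValueError.
def Pre_findLastNotOf (iterable : List Int) (blackList : List Int) : Prop := blackList ≠ []
instance (iterable : List Int) (blackList : List Int) : Decidable (Pre_findLastNotOf iterable blackList) := by unfold Pre_findLastNotOf; infer_instance
def pvWitness_findLastNotOf : List Int × List Int := ([1, 2, 3], [2])

def Spec_findLastNotOf (iterable : List Int) (blackList : List Int) (out : Int) : Prop := out = findLastNotOf_alt iterable blackList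
instance (iterable : List Int) (blackList : List Int) (out : Int) : Decidable (Spec_findLastNotOf iterable blackList out) := by unfold Spec_findLastNotOf; infer_instance

-- ===== CLAIM (what is proved, stated in full; the proofs are below) =====
def Claim_equal_findLastNotOf : Prop := ∀ (iterable : List Int) (blackList : List Int), Dom_findLastNotOf iterable blackList → Pre_findLastNotOf iterable blackList → Spec_findLastNotOf iterable blackList (findLastNotOf iterable blackList)

-- ===== LEMMAS AND PROOFS =====

-- A and B agree on every list (the empty-blacklist guard is excluded by Pre_, but
-- the ports themselves agree everywhere), by induction from the right end.
theorem findLastNotOf_eq_alt (iterable blackList : List Int) :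
    findLastNotOf iterable blackList = findLastNotOf_alt iterable blackList := by
  induction iterable using List.reverseRecOn with
  | nil => simp [findLastNotOf, findLastNotOf_alt, findLastNotOfGo]
  | append_singleton l x ih =>
      unfold findLastNotOf findLastNotOf_alt
      rw [List.reverse_append]
      simp only [List.reverse_singleton, List.singleton_append, List.length_append,
        List.length_singleton, findLastNotOfGo, List.range_succ, List.foldl_append,
        List.foldl_cons, List.foldl_nil]
      have hx : (l ++ [x]).getD l.length 0 = x := by
        simp [List.getD]
      rw [hx]
      have hfold : (List.range l.length).foldl
          (fun result i => if ¬ blackList.contains ((l ++ [x]).getD i 0) then (i : Int) else result) (-1)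
          = (List.range l.length).foldl
          (fun result i => if ¬ blackList.contains (l.getD i 0) then (i : Int) else result) (-1) := by
        apply PySem.List.foldl_congr_mem
        intro acc i hi
        have hlt : i < l.length := List.mem_range.mp hi
        have h2 : (l ++ [x]).getD i 0 = l.getD i 0 := by
          simp [List.getD, List.getElem?_append_left hlt]
        rw [h2]
      rw [hfold]
      have harg : ((l.length + 1 : Nat) : Int) - 1 = (l.length : Int) := by push_cast; ring
      rw [harg]
      by_cases hb : blackList.contains x
      · simp only [hb, not_true_eq_false, if_false]
        have := ih
        unfold findLastNotOf findLastNotOf_alt at this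
        exact this
      · have hx2 : x ∉ blackList := by simpa using hb
        simp [hx2]

-- ===== VERDICT (by name: the statement is the Claim_ definition above) =====
theorem findLastNotOf_spec : Claim_equal_findLastNotOf := by
  intro iterable blackList _ _
  unfold Spec_findLastNotOf
  exact findLastNotOf_eq_alt iterable blackList
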